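-- pv_equiv track=rewrite | github.com/jonathonreilly/toy-physics | scripts/frontier_staggered_backreaction_prototype.py | _find_cycle_edge
-- ===== SOURCE A (Python) =====
-- def _find_cycle_edge(adj: dict[int, list[int]]) -> tuple[int, int] | None:
--     state: dict[int, int] = {}
--
--     def dfs(node: int, prev: int | None) -> tuple[int, int] | None:
--         state[node] = 1
--         for nb in adj.get(node, []):
--             if nb == prev:
--                 continue
--             if nb not in state:
--                 hit = dfs(nb, node)
--                 if hit is not None:
--                     return hit
--             elif state[nb] == 1:
--                 return (node, nb)
--         state[node] = 2
--         return None
--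
--     for start in sorted(adj):
--         if start in state:
--             continue
--         hit = dfs(start, None)
--         if hit is not None:
--             return hit
--     return None
-- ===== SOURCE B (Python) =====
-- def _find_cycle_edge(adj: dict[int, list[int]]) -> tuple[int, int] | None:
--     state: dict[int, int] = {}
--     for start in sorted(adj):
--         if start in state:
--             continue
--         state[start] = 1
--         stack = [(start, None, iter(adj.get(start, [])))]
--         while stack:
--             node, prev, it = stack[-1]
--             advanced = False
--             for nb in it:
--                 if nb == prev:
--                     continue
--                 if nb not in state:
--                     state[nb] = 1
--                     stack.append((nb, node, iter(adj.get(nb, []))))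
--                     advanced = True
--                     break
--                 elif state[nb] == 1:
--                     return (node, nb)
--             if not advanced:
--                 state[node] = 2
--                 stack.pop()
--     return None
-- ===== Notes on version B (the rewrite author's own statement) =====
-- stated objective: alternative
-- what changed: A's recursive dfs helper (call stack + closure over a shared state dict) is replaced by an iterative DFS that manages an explicit stack of (node, prev, neighbour-iterator) frames inside the same outer sorted-start loop, so no recursion (and no Python recursion-depth limit) is involved.
import Mathlib
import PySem

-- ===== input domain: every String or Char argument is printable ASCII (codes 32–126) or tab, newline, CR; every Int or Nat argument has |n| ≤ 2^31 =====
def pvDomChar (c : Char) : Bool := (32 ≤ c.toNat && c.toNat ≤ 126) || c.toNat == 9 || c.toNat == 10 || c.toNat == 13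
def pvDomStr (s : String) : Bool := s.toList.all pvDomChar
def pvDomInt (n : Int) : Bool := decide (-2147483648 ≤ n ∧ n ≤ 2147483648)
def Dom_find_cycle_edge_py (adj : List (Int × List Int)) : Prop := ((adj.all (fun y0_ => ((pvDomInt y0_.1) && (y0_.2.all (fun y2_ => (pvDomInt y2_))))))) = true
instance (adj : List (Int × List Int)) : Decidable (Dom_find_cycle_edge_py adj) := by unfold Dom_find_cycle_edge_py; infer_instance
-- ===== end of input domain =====

-- B replaces A's recursive dfs by an explicit-stack iterative DFS (same traversal order); return value only, no observable mutation.

-- adj.get(node, []) on the dict parameter (first-match association-list lookup)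
def pvAdjGet (adj : List (Int × List Int)) (k : Int) : List Int :=
  (PySem.Dict.mk adj).getD k []

-- fuel bound used by both ports purely as a totality guard for the (mutual) recursion:
-- the DFS nests at most once per node ever marked, and every marked node occurs in adj,
-- so adj.length + Σ|neighbour lists| + 2 is never exhausted.
def pvFuel (adj : List (Int × List Int)) : Nat :=
  adj.length + (adj.map (fun p => p.2.length)).sum + 2

-- ===== PORT A =====
-- the `for nb in adj.get(node, [])` loop body of A's dfs; fuel f is the remaining
-- recursion depth available to nested dfs calls (at fuel 0 the guard returns dfs's
-- out-of-fuel value (none, st), which sufficient initial fuel never reaches)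
def pvLoopA (adj : List (Int × List Int)) :
    Nat → Int → Option Int → List Int → PySem.Dict Int Int →
    Option (Int × Int) × PySem.Dict Int Int
  | _, node, _, [], st => (none, st.insert node 2)
  | f, node, prev, nb :: tl, st =>
    if some nb = prev then pvLoopA adj f node prev tl st
    else
      match st.get? nb with
      | none =>
        match f with
        | 0 => pvLoopA adj 0 node prev tl st
        | f' + 1 =>
          match pvLoopA adj f' nb (some node) (pvAdjGet adj nb) (st.insert nb 1) with
          | (some h, st') => (some h, st')
          | (none, st') => pvLoopA adj (f' + 1) node prev tl st'
      | some s => if s = 1 then (some (node, nb), st) else pvLoopA adj f node prev tl st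
  termination_by f _ _ nbs _ => (f, nbs.length)

-- the `for start in sorted(adj)` loop of A
def pvOuterA (adj : List (Int × List Int)) (F : Nat) :
    List Int → PySem.Dict Int Int → Option (Int × Int)
  | [], _ => none
  | k :: ks, st =>
    if (st.get? k).isSome then pvOuterA adj F ks st
    else
      match pvLoopA adj F k none (pvAdjGet adj k) (st.insert k 1) with
      | (some h, _) => some h
      | (none, st') => pvOuterA adj F ks st'

def find_cycle_edge_py (adj : List (Int × List Int)) : Option (Int × Int) :=
  pvOuterA adj (pvFuel adj) (PySem.List.sorted (adj.map Prod.fst) (fun x => x) false) PySem.Dict.empty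

-- ===== PORT B =====
-- stack frame of B: fuel is the remaining recursion-depth budget (the totality guard,
-- never exhausted from pvFuel); nbs are the neighbours the frame's iterator has not yet consumed
structure PvFrame where
  fuel : Nat
  node : Int
  prev : Option Int
  nbs : List Int
  deriving Repr, DecidableEq

def pvFrameWeight (S : Nat) (fr : PvFrame) : Nat :=
  (fr.nbs.length + 1) * (S + 2) ^ fr.fuel

-- used only by pvRunB's decreasing_by: a stored neighbour list is one of adj's lists
theorem pvAdjGet_len_le (adj : List (Int × List Int)) (q : Int) :
    (pvAdjGet adj q).length ≤ (adj.map (fun p => p.2.length)).sum := by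
  induction adj with
  | nil => simp [pvAdjGet, PySem.Dict.getD, PySem.Dict.get?]
  | cons p rest ih =>
    obtain ⟨k, v⟩ := p
    rw [pvAdjGet, PySem.Dict.getD_eq_get?_getD, PySem.Dict.get?_mk_cons]
    simp only [pvAdjGet, PySem.Dict.getD_eq_get?_getD] at ih
    cases hkq : (k == q) with
    | true => simp
    | false => simp; omega

-- small measure facts cited by pvRunB's decreasing_by
theorem pvFWPos (S : Nat) (fr : PvFrame) : 0 < pvFrameWeight S fr :=
  Nat.mul_pos (Nat.succ_pos _) (Nat.one_le_pow _ _ (Nat.succ_pos _))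

theorem pvDecPop (S : Nat) (fr : PvFrame) (rest : List PvFrame) :
    (rest.map (pvFrameWeight S)).sum < ((fr :: rest).map (pvFrameWeight S)).sum :=
  Nat.lt_add_of_pos_left (pvFWPos S fr)

theorem pvDecTop (S : Nat) (fr fr' : PvFrame) (rest : List PvFrame)
    (h : pvFrameWeight S fr' < pvFrameWeight S fr) :
    ((fr' :: rest).map (pvFrameWeight S)).sum < ((fr :: rest).map (pvFrameWeight S)).sum :=
  Nat.add_lt_add_right h _

theorem pvDecPush (S : Nat) (frc frt fr : PvFrame) (rest : List PvFrame)
    (h : pvFrameWeight S frc + pvFrameWeight S frt < pvFrameWeight S fr) :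
    ((frc :: frt :: rest).map (pvFrameWeight S)).sum < ((fr :: rest).map (pvFrameWeight S)).sum :=
  Nat.lt_of_le_of_lt (Nat.le_of_eq (Nat.add_assoc _ _ _).symm)
    (Nat.add_lt_add_right h _)

theorem pvFWTail (S : Nat) (fr : PvFrame) (g : Nat) (n' : Int) (p' : Option Int)
    (nb : Int) (tl : List Int) (hn : fr.nbs = nb :: tl) (hf : fr.fuel = g) :
    pvFrameWeight S ⟨g, n', p', tl⟩ < pvFrameWeight S fr := by
  show (tl.length + 1) * (S + 2) ^ g < (fr.nbs.length + 1) * (S + 2) ^ fr.fuel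
  rw [hn, hf, List.length_cons]
  exact (Nat.mul_lt_mul_right (Nat.one_le_pow _ _ (Nat.succ_pos _))).mpr
    (Nat.lt_succ_self _)

theorem pvFWPush (S : Nat) (fr : PvFrame) (f' : Nat) (n1 n2 : Int) (p1 p2 : Option Int)
    (nb : Int) (tl c : List Int) (hn : fr.nbs = nb :: tl) (hf : fr.fuel = f' + 1)
    (hc : c.length ≤ S) :
    pvFrameWeight S ⟨f', n1, p1, c⟩ + pvFrameWeight S ⟨f' + 1, n2, p2, tl⟩
      < pvFrameWeight S fr := by
  have hp : 0 < (S + 2) ^ f' := Nat.one_le_pow _ _ (Nat.succ_pos _)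
  have key : (c.length + 1) * (S + 2) ^ f' < (S + 2) ^ (f' + 1) := by
    rw [pow_succ]
    exact Nat.lt_of_le_of_lt
      (Nat.mul_le_mul_right _ (Nat.succ_le_succ hc))
      (Nat.lt_of_lt_of_eq ((Nat.mul_lt_mul_right hp).mpr (Nat.lt_succ_self (S + 1)))
        (Nat.mul_comm _ _))
  show (c.length + 1) * (S + 2) ^ f' + (tl.length + 1) * (S + 2) ^ (f' + 1)
      < (fr.nbs.length + 1) * (S + 2) ^ fr.fuel
  rw [hn, hf, List.length_cons]
  exact Nat.lt_of_lt_of_eq (Nat.add_lt_add_right key _)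
    ((Nat.add_comm _ _).trans (Nat.succ_mul _ _).symm)

-- B's `while stack:` loop
def pvRunB (adj : List (Int × List Int)) :
    List PvFrame → PySem.Dict Int Int → Option (Int × Int) × PySem.Dict Int Int
  | [], st => (none, st)
  | fr :: rest, st =>
    match hn : fr.nbs with
    | [] => pvRunB adj rest (st.insert fr.node 2)
    | nb :: tl =>
      if some nb = fr.prev then pvRunB adj (⟨fr.fuel, fr.node, fr.prev, tl⟩ :: rest) st
      else
        match st.get? nb with
        | none =>
          match hf : fr.fuel with
          | 0 => pvRunB adj (⟨0, fr.node, fr.prev, tl⟩ :: rest) st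
          | f' + 1 =>
            pvRunB adj
              (⟨f', nb, some fr.node, pvAdjGet adj nb⟩ :: ⟨f' + 1, fr.node, fr.prev, tl⟩ :: rest)
              (st.insert nb 1)
        | some s =>
          if s = 1 then (some (fr.node, nb), st)
          else pvRunB adj (⟨fr.fuel, fr.node, fr.prev, tl⟩ :: rest) st
  termination_by stack _ => (stack.map (pvFrameWeight ((adj.map (fun p => p.2.length)).sum))).sum
  decreasing_by
  · exact pvDecPop _ _ _
  · exact pvDecTop _ _ _ _ (pvFWTail _ _ _ _ _ _ _ hn rfl)
  · exact pvDecTop _ _ _ _ (pvFWTail _ _ _ _ _ _ _ hn hf)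
  · exact pvDecPush _ _ _ _ _ (pvFWPush _ _ _ _ _ _ _ _ _ _ hn hf (pvAdjGet_len_le adj nb))
  · exact pvDecTop _ _ _ _ (pvFWTail _ _ _ _ _ _ _ hn rfl)

-- the `for start in sorted(adj)` loop of B: each unvisited start is marked gray and
-- pushed as the single initial frame of the stack machine
def pvOuterB (adj : List (Int × List Int)) (F : Nat) :
    List Int → PySem.Dict Int Int → Option (Int × Int)
  | [], _ => none
  | k :: ks, st =>
    if (st.get? k).isSome then pvOuterB adj F ks st
    else
      match pvRunB adj [⟨F, k, none, pvAdjGet adj k⟩] (st.insert k 1) with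
      | (some h, _) => some h
      | (none, st') => pvOuterB adj F ks st'

def find_cycle_edge_py_alt (adj : List (Int × List Int)) : Option (Int × Int) :=
  pvOuterB adj (pvFuel adj) (PySem.List.sorted (adj.map Prod.fst) (fun x => x) false) PySem.Dict.empty

-- ===== PRECONDITION & SPEC =====
def Spec_find_cycle_edge_py (adj : List (Int × List Int)) (out : Option (Int × Int)) : Prop := out = find_cycle_edge_py_alt adj
instance (adj : List (Int × List Int)) (out : Option (Int × Int)) : Decidable (Spec_find_cycle_edge_py adj out) := by unfold Spec_find_cycle_edge_py; infer_instance

-- ===== CLAIM (what is proved, stated in full; the proofs are below) =====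
def Claim_equal_find_cycle_edge_py : Prop := ∀ (adj : List (Int × List Int)), Dom_find_cycle_edge_py adj → Spec_find_cycle_edge_py adj (find_cycle_edge_py adj)

-- ===== LEMMAS AND PROOFS =====

-- simulation: running B's stack machine with top frame (f, node, prev, nbs) is exactly
-- A's neighbour loop at fuel f followed by the machine on the remaining stack
theorem pvSim (adj : List (Int × List Int)) :
    ∀ (f : Nat) (nbs : List Int) (node : Int) (prev : Option Int)
      (st : PySem.Dict Int Int) (rest : List PvFrame),
      pvRunB adj (⟨f, node, prev, nbs⟩ :: rest) st =
        match pvLoopA adj f node prev nbs st with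
        | (some h, st') => (some h, st')
        | (none, st') => pvRunB adj rest st' := by
  intro f
  induction f with
  | zero =>
    intro nbs
    induction nbs with
    | nil => intro node prev st rest; simp [pvRunB, pvLoopA]
    | cons nb tl ih =>
      intro node prev st rest
      rw [pvRunB, pvLoopA]
      by_cases hp : some nb = prev
      · simp only [hp, if_true]; exact ih node prev st rest
      · simp only [if_neg hp]
        cases hg : st.get? nb with
        | none => exact ih node prev st rest
        | some s =>
          by_cases hs : s = 1
          · simp [hs]
          · simp only [if_neg hs]; exact ih node prev st rest
  | succ f ihf =>
    intro nbs
    induction nbs with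
    | nil => intro node prev st rest; simp [pvRunB, pvLoopA]
    | cons nb tl ih =>
      intro node prev st rest
      rw [pvRunB, pvLoopA]
      by_cases hp : some nb = prev
      · simp only [hp, if_true]; exact ih node prev st rest
      · simp only [if_neg hp]
        cases hg : st.get? nb with
        | none =>
          rw [ihf (pvAdjGet adj nb) nb (some node) (st.insert nb 1)
            (⟨f + 1, node, prev, tl⟩ :: rest)]
          cases hc : pvLoopA adj f nb (some node) (pvAdjGet adj nb) (st.insert nb 1) with
          | mk hit st' =>
            cases hit with
            | none => simp only []; exact ih node prev st' rest
            | some h => simp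
        | some s =>
          by_cases hs : s = 1
          · simp [hs]
          · simp only [if_neg hs]; exact ih node prev st rest

theorem pvOuter_eq (adj : List (Int × List Int)) (F : Nat) :
    ∀ (ks : List Int) (st : PySem.Dict Int Int),
      pvOuterB adj F ks st = pvOuterA adj F ks st := by
  intro ks
  induction ks with
  | nil => intro st; rfl
  | cons k tl ih =>
    intro st
    rw [pvOuterA, pvOuterB]
    by_cases hv : (st.get? k).isSome
    · simp only [if_pos hv]; exact ih st
    · simp only [if_neg hv]
      rw [pvSim adj F (pvAdjGet adj k) k none (st.insert k 1) []]
      cases hc : pvLoopA adj F k none (pvAdjGet adj k) (st.insert k 1) with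
      | mk hit st' =>
        cases hit with
        | none => simp only [pvRunB]; exact ih st'
        | some h => rfl

-- ===== VERDICT (by name: the statement is the Claim_ definition above) =====
theorem find_cycle_edge_py_spec : Claim_equal_find_cycle_edge_py := by
  intro adj _
  unfold Spec_find_cycle_edge_py find_cycle_edge_py find_cycle_edge_py_alt
  exact (pvOuter_eq adj (pvFuel adj) _ _).symm
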